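-- pv_equiv track=rewrite | github.com/dlsnyder8/TimeTables | database.py | parse_user_schedule
-- ===== SOURCE A (Python) =====
-- def parse_user_schedule(netid, groupschedule):
--     output = {}
--     # start with blank dict
--     for i in range(24):
--         output[str(i)] = [False] * 7
--     for key in groupschedule:
--         if netid in groupschedule[key]:
--             items = key.split('_')
--             day = items[0]
--             day = int(day)
--             start = items[1]
--             end = items[2]
--             # make sure shift is one day
--             if start < end:
--                 for i in range(int(start), int(end)):
--                     output[str(i)][day] = True
--             else:
--                 for i in range(int(start), 24):
--                     output[str(i)][day] = True
--                 for i in range(int(end)):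
--                     output[str(i)][(day + 1) % 7] = True
--     return output
-- ===== SOURCE B (Python) =====
-- def parse_user_schedule(netid, groupschedule):
--     # cell-major: collect the user's shifts once, then build the grid by testing
--     # each (hour, weekday) cell against the shift intervals with modular arithmetic
--     shifts = [key.split('_') for key, members in groupschedule.items() if netid in members]
--
--     def covered(h, d):
--         for items in shifts:
--             day = int(items[0])
--             start, end = items[1], items[2]
--             if start < end:
--                 if d == day % 7 and int(start) <= h < int(end):
--                     return True
--             else:
--                 if (d == day % 7 and int(start) <= h) or (d == (day + 1) % 7 and h < int(end)):
--                     return True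
--         return False
--
--     return {str(h): [covered(h, d) for d in range(7)] for h in range(24)}
-- ===== Notes on version B (the rewrite author's own statement) =====
-- stated objective: alternative
-- what changed: B inverts the traversal: instead of pre-building a 24x7 grid and mutating cells span-by-span per shift (two fill loops on wraparound), it collects the user's shifts once and then builds the grid cell-major, deciding each (hour, weekday) cell by an interval/modular-arithmetic membership test over the shifts; no dict mutation at all.
import Mathlib
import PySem

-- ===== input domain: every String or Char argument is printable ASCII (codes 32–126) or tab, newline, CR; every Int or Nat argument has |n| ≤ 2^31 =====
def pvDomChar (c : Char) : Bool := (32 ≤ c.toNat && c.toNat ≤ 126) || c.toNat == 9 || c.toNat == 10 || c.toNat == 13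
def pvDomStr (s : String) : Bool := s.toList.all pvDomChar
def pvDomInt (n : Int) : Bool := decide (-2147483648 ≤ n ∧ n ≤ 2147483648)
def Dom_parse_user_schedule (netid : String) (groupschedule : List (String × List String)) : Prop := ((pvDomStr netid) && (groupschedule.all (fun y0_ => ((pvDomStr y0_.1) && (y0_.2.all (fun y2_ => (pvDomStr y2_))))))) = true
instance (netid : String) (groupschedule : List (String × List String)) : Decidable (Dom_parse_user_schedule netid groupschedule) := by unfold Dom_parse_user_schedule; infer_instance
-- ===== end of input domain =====

-- B is cell-major instead of span-marking: it collects the user's shifts once, then decides each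
-- (hour, weekday) cell by an interval/modular-arithmetic test (objective: alternative, same cost);
-- return-value equivalence on Pre_.


-- ===== PORT A =====
def parse_user_schedule (netid : String) (groupschedule : List (String × List String)) : List (String × List Bool) :=
  -- output = {}; for i in range(24): output[str(i)] = [False]*7
  let output : PySem.Dict String (List Bool) :=
    (PySem.List.pyRange 0 24 1).foldl
      (fun d i => d.insert (PySem.Int.toStr i) (List.replicate 7 false)) (PySem.Dict.mk [])
  -- for key in groupschedule: … (dict iteration; Pre_ requires nodup keys, i.e. a genuine dict)
  (groupschedule.foldl (fun out kv =>
    if netid ∈ kv.2 then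
      let items := (PySem.Str.split? kv.1 "_").getD []  -- sep "_" ≠ "": split? is always some
      match PySem.List.pyGet? items 0, PySem.List.pyGet? items 1, PySem.List.pyGet? items 2 with
      | some dayStr, some start, some «end» =>
        match PySem.Int.ofStr? dayStr, PySem.Int.ofStr? start, PySem.Int.ofStr? «end» with
        | some day, some s, some e =>
          if start.toList < «end».toList then  -- Python's string '<' = code-point lexicographic = List Char '<'
            (PySem.List.pyRange s e 1).foldl
              (fun o i => o.modify (PySem.Int.toStr i) [] (fun l => PySem.List.pySetD l day true)) out
          else
            let out1 := (PySem.List.pyRange s 24 1).foldl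
              (fun o i => o.modify (PySem.Int.toStr i) [] (fun l => PySem.List.pySetD l day true)) out
            (PySem.List.pyRange 0 e 1).foldl
              (fun o i => o.modify (PySem.Int.toStr i) [] (fun l => PySem.List.pySetD l (PySem.Int.mod (day + 1) 7) true)) out1
        | _, _, _ => out  -- int() ValueError: outside Pre_
      | _, _, _ => out    -- IndexError on items: outside Pre_
    else out) output).items

-- ===== PORT B =====
-- B's per-shift cell test 'covered' (the body of its for loop over shifts, one shift at a time)
def pvCovers (items : List String) (h d : Int) : Bool :=
  match PySem.List.pyGet? items 0 with
  | none => false           -- IndexError: outside Pre_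
  | some dayStr =>
    match PySem.Int.ofStr? dayStr with
    | none => false         -- int() ValueError: outside Pre_
    | some day =>
      match PySem.List.pyGet? items 1 with
      | none => false
      | some start =>
        match PySem.List.pyGet? items 2 with
        | none => false
        | some «end» =>
          match PySem.Int.ofStr? start with
          | none => false
          | some s =>
            match PySem.Int.ofStr? «end» with
            | none => false
            | some e =>
              if start.toList < «end».toList then  -- Python's string '<' = code-point lexicographic
                (d == PySem.Int.mod day 7) && (decide (s ≤ h) && decide (h < e))
              else
                ((d == PySem.Int.mod day 7) && decide (s ≤ h)) || ((d == PySem.Int.mod (day + 1) 7) && decide (h < e))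

def parse_user_schedule_alt (netid : String) (groupschedule : List (String × List String)) : List (String × List Bool) :=
  -- shifts = [key.split('_') for key, members in groupschedule.items() if netid in members]
  let shifts := (groupschedule.filter (fun kv => netid ∈ kv.2)).map (fun kv => (PySem.Str.split? kv.1 "_").getD [])
  -- {str(h): [covered(h, d) for d in range(7)] for h in range(24)} — keys str(0)..str(23) are
  -- distinct, so the dict's items are exactly this list in insertion order
  (PySem.List.pyRange 0 24 1).map (fun h =>
    (PySem.Int.toStr h,
     (PySem.List.pyRange 0 7 1).map (fun d =>
       -- covered(h, d): the for loop with early 'return True' over shifts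
       shifts.any (fun items => pvCovers items h d))))

-- ===== PRECONDITION & SPEC =====
-- a key that A can process without raising: at least three '_'-fields whose first three parse as
-- ints, and whichever hour loops A actually runs stay inside the grid: for a non-empty marking
-- loop its hours must lie in 0..23 (else KeyError on a missing hour key) and, where the plain day
-- index is used, -7 ≤ day < 7 (else IndexError on the 7-element row)
def pvKeyOK (k : String) : Bool :=
  let items := (PySem.Str.split? k "_").getD []
  match PySem.List.pyGet? items 0 with
  | none => false
  | some a =>
    match PySem.List.pyGet? items 1 with
    | none => false
    | some b =>
      match PySem.List.pyGet? items 2 with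
      | none => false
      | some c =>
        match PySem.Int.ofStr? a with
        | none => false
        | some day =>
          match PySem.Int.ofStr? b with
          | none => false
          | some s =>
            match PySem.Int.ofStr? c with
            | none => false
            | some e =>
              let daybound := decide (-7 ≤ day) && decide (day < 7)
              if b.toList < c.toList then  -- Python's string '<' on the raw fields
                !decide (s < e) || (decide (0 ≤ s) && decide (e ≤ 24) && daybound)
              else
                (!decide (s < 24) || (decide (0 ≤ s) && daybound)) && (!decide (0 < e) || decide (e ≤ 24))

-- Pre_ excludes duplicate keys (impossible in the real Python dict input) and, for keys whose
-- member list contains netid, keys on which A raises: malformed or non-integer fields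
-- (ValueError/IndexError), hour loops reaching an hour outside 0..23 (KeyError), or a day outside
-- -7..6 used as a row index (IndexError)
def Pre_parse_user_schedule (netid : String) (groupschedule : List (String × List String)) : Prop :=
  (groupschedule.map Prod.fst).Nodup ∧ ∀ p ∈ groupschedule, netid ∈ p.2 → pvKeyOK p.1 = true
instance (netid : String) (groupschedule : List (String × List String)) : Decidable (Pre_parse_user_schedule netid groupschedule) := by unfold Pre_parse_user_schedule; infer_instance

def pvWitness_parse_user_schedule : String × (List (String × List String)) :=
  ("u", [("0_9_17", ["u", "v"]), ("3_22_6", ["u"]), ("1_2_3", ["w"])])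

def Spec_parse_user_schedule (netid : String) (groupschedule : List (String × List String)) (out : List (String × List Bool)) : Prop := out = parse_user_schedule_alt netid groupschedule
instance (netid : String) (groupschedule : List (String × List String)) (out : List (String × List Bool)) : Decidable (Spec_parse_user_schedule netid groupschedule out) := by unfold Spec_parse_user_schedule; infer_instance

-- ===== CLAIM (what is proved, stated in full; the proofs are below) =====
def Claim_equal_parse_user_schedule : Prop := ∀ (netid : String) (groupschedule : List (String × List String)), Dom_parse_user_schedule netid groupschedule → Pre_parse_user_schedule netid groupschedule → Spec_parse_user_schedule netid groupschedule (parse_user_schedule netid groupschedule)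

-- ===== LEMMAS AND PROOFS =====

-- the grid's key list, "0" … "23"
def pvStdK : List String := (PySem.List.pyRange 0 24 1).map PySem.Int.toStr

-- A's loop body as a named function (definitionally A's fold lambda)
def pvAStep (netid : String) (out : PySem.Dict String (List Bool)) (kv : String × List String) :
    PySem.Dict String (List Bool) :=
  if netid ∈ kv.2 then
    let items := (PySem.Str.split? kv.1 "_").getD []
    match PySem.List.pyGet? items 0, PySem.List.pyGet? items 1, PySem.List.pyGet? items 2 with
    | some dayStr, some start, some «end» =>
      match PySem.Int.ofStr? dayStr, PySem.Int.ofStr? start, PySem.Int.ofStr? «end» with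
      | some day, some s, some e =>
        if start.toList < «end».toList then  -- Python's string '<' = code-point lexicographic = List Char '<'
          (PySem.List.pyRange s e 1).foldl
            (fun o i => o.modify (PySem.Int.toStr i) [] (fun l => PySem.List.pySetD l day true)) out
        else
          let out1 := (PySem.List.pyRange s 24 1).foldl
            (fun o i => o.modify (PySem.Int.toStr i) [] (fun l => PySem.List.pySetD l day true)) out
          (PySem.List.pyRange 0 e 1).foldl
            (fun o i => o.modify (PySem.Int.toStr i) [] (fun l => PySem.List.pySetD l (PySem.Int.mod (day + 1) 7) true)) out1
      | _, _, _ => out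
    | _, _, _ => out
  else out

theorem pv_toStr_inj (a b : Int) (ha0 : 0 ≤ a) (ha : a < 24) (hb0 : 0 ≤ b) (hb : b < 24)
    (h : PySem.Int.toStr a = PySem.Int.toStr b) : a = b := by
  interval_cases a <;> interval_cases b <;> revert h <;> decide

theorem pv_mem_stdK (i : Int) (h0 : 0 ≤ i) (h1 : i < 24) : PySem.Int.toStr i ∈ pvStdK := by
  exact List.mem_map_of_mem (PySem.List.mem_pyRange_one.mpr ⟨h0, h1⟩)

theorem pv_mod_small (x : Int) (h0 : 0 ≤ x) (h1 : x < 7) : PySem.Int.mod x 7 = x := by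
  rw [PySem.Int.mod_eq_emod_of_pos (by norm_num : (0:Int) < 7)]
  exact Int.emod_eq_of_lt h0 h1

theorem pv_mod_idem (x : Int) : PySem.Int.mod (PySem.Int.mod x 7) 7 = PySem.Int.mod x 7 :=
  pv_mod_small _ (PySem.Int.mod_nonneg x (by norm_num)) (PySem.Int.mod_lt x (by norm_num))

-- setting a row cell: pySetD on the mapped 7-range marks column day % 7
theorem pv_set_row (f : Int → Bool) (day : Int) (h1 : -7 ≤ day) (h2 : day < 7) :
    PySem.List.pySetD ((PySem.List.pyRange 0 7 1).map f) day true
      = (PySem.List.pyRange 0 7 1).map (fun c => f c || decide (c = PySem.Int.mod day 7)) := by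
  have e : PySem.List.pyRange 0 7 1 = [0,1,2,3,4,5,6] := by decide
  rw [e]
  interval_cases day <;>
    simp [PySem.List.pySetD, PySem.List.pySet?, PySem.List.pyIdx?, PySem.Int.mod, List.set]

theorem pv_cell_same (P Q : Prop) [Decidable P] [Decidable Q] (c m : Int) :
    (decide (P ∧ Q) && decide (c = m)) = ((c == m) && (decide P && decide Q)) := by
  by_cases hP : P <;> by_cases hQ : Q <;> by_cases hc : c = m <;> simp [hP, hQ, hc]

theorem pv_cell_wrap (a : Bool) (s e h c m1 m2 : Int) (h0 : 0 ≤ h) (h24 : h < 24) :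
    ((a || (decide (s ≤ h ∧ h < 24) && decide (c = m1))) || (decide (0 ≤ h ∧ h < e) && decide (c = m2)))
    = (a || (((c == m1) && decide (s ≤ h)) || ((c == m2) && decide (h < e)))) := by
  by_cases r1 : s ≤ h <;> by_cases r2 : h < e <;> by_cases r3 : c = m1 <;> by_cases r4 : c = m2 <;>
    simp [r1, r2, r3, r4, h0, h24, Bool.beq_eq_decide_eq]

theorem pv_bool_or (a x y p : Bool) : ((a || (x && p)) || (y && p)) = (a || ((x || y) && p)) := by
  cases a <;> cases x <;> cases y <;> cases p <;> rfl

-- one marking loop of A, tracked pointwise: it ORs in (h ∈ L && c = day % 7)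
theorem pv_markFold (L : List Int) (day : Int) (q : Int → Int → Bool)
    (d : PySem.Dict String (List Bool))
    (hL : ∀ i ∈ L, 0 ≤ i ∧ i < 24)
    (hday : L ≠ [] → -7 ≤ day ∧ day < 7)
    (hkeys : d.keys = pvStdK)
    (hval : ∀ h : Int, 0 ≤ h → h < 24 →
      d.getD (PySem.Int.toStr h) [] = (PySem.List.pyRange 0 7 1).map (q h)) :
    (L.foldl (fun o i => o.modify (PySem.Int.toStr i) [] (fun l => PySem.List.pySetD l day true)) d).keys = pvStdK
    ∧ ∀ h : Int, 0 ≤ h → h < 24 →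
      (L.foldl (fun o i => o.modify (PySem.Int.toStr i) [] (fun l => PySem.List.pySetD l day true)) d).getD (PySem.Int.toStr h) []
      = (PySem.List.pyRange 0 7 1).map
          (fun c => q h c || (decide (h ∈ L) && decide (c = PySem.Int.mod day 7))) := by
  induction L generalizing q d with
  | nil =>
    refine ⟨hkeys, fun h h0 h24 => ?_⟩
    simp only [List.foldl_nil]
    rw [hval h h0 h24]
    simp
  | cons i L ih =>
    simp only [List.foldl_cons]
    obtain ⟨hi0, hi24⟩ := hL i List.mem_cons_self
    obtain ⟨hb1, hb2⟩ := hday (by simp)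
    have hk1 : (d.modify (PySem.Int.toStr i) [] (fun l => PySem.List.pySetD l day true)).keys = pvStdK := by
      rw [PySem.Dict.keys_modify,
        PySem.Dict.keys_insert_of_contains _ _
          ((PySem.Dict.contains_iff_mem_keys _ _).mpr (by rw [hkeys]; exact pv_mem_stdK i hi0 hi24)),
        hkeys]
    have hv1 : ∀ h : Int, 0 ≤ h → h < 24 →
        (d.modify (PySem.Int.toStr i) [] (fun l => PySem.List.pySetD l day true)).getD (PySem.Int.toStr h) []
        = (PySem.List.pyRange 0 7 1).map
            (fun c => q h c || (decide (h = i) && decide (c = PySem.Int.mod day 7))) := by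
      intro h h0 h24
      rw [PySem.Dict.getD_modify]
      by_cases he : PySem.Int.toStr h = PySem.Int.toStr i
      · have hhi : h = i := pv_toStr_inj _ _ h0 h24 hi0 hi24 he
        subst hhi
        rw [if_pos rfl, hval h h0 h24, pv_set_row (q h) day hb1 hb2]
        apply List.map_congr_left
        intro c _
        simp
      · have hne : h ≠ i := fun e => he (e ▸ rfl)
        rw [if_neg he, hval h h0 h24]
        apply List.map_congr_left
        intro c _
        simp [hne]
    obtain ⟨K, V⟩ := ih (fun h c => q h c || (decide (h = i) && decide (c = PySem.Int.mod day 7))) _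
      (fun j hj => hL j (List.mem_cons_of_mem i hj)) (fun _ => ⟨hb1, hb2⟩) hk1 hv1
    refine ⟨K, fun h h0 h24 => ?_⟩
    rw [V h h0 h24]
    apply List.map_congr_left
    intro c _
    simp only [List.mem_cons, Bool.decide_or]
    exact pv_bool_or (q h c) _ _ _

-- A's processing of one matched, well-formed key ORs in exactly B's pvCovers test
theorem pv_keyStep (netid : String) (kv : String × List String) (hm : netid ∈ kv.2)
    (hok : pvKeyOK kv.1 = true) (q : Int → Int → Bool) (d : PySem.Dict String (List Bool))
    (hkeys : d.keys = pvStdK)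
    (hval : ∀ h : Int, 0 ≤ h → h < 24 →
      d.getD (PySem.Int.toStr h) [] = (PySem.List.pyRange 0 7 1).map (q h)) :
    (pvAStep netid d kv).keys = pvStdK
    ∧ ∀ h : Int, 0 ≤ h → h < 24 →
      (pvAStep netid d kv).getD (PySem.Int.toStr h) []
      = (PySem.List.pyRange 0 7 1).map
          (fun c => q h c || pvCovers ((PySem.Str.split? kv.1 "_").getD []) h c) := by
  unfold pvKeyOK at hok
  unfold pvAStep
  rw [if_pos hm]
  rcases hg0 : PySem.List.pyGet? ((PySem.Str.split? kv.1 "_").getD []) 0 with _ | dayStr <;>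
  rcases hg1 : PySem.List.pyGet? ((PySem.Str.split? kv.1 "_").getD []) 1 with _ | start <;>
  rcases hg2 : PySem.List.pyGet? ((PySem.Str.split? kv.1 "_").getD []) 2 with _ | end_ <;>
    simp only [hg0, hg1, hg2] at hok ⊢ <;> try exact (Bool.false_ne_true hok).elim
  rcases hp0 : PySem.Int.ofStr? dayStr with _ | day <;>
  rcases hp1 : PySem.Int.ofStr? start with _ | s <;>
  rcases hp2 : PySem.Int.ofStr? end_ with _ | e <;>
    simp only [hp0, hp1, hp2] at hok ⊢ <;> try exact (Bool.false_ne_true hok).elim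
  by_cases hlt : start.toList < end_.toList
  · -- same-day branch
    rw [if_pos hlt] at hok ⊢
    have hse' : PySem.List.pyRange s e 1 ≠ [] → s < e := by
      intro hne
      by_contra hc
      exact hne (PySem.List.pyRange_one_eq_nil (by omega))
    have hbnds : s < e → 0 ≤ s ∧ e ≤ 24 ∧ -7 ≤ day ∧ day < 7 := by
      intro hse
      simp only [hse, decide_true, Bool.not_true, Bool.false_or, Bool.and_eq_true,
        decide_eq_true_eq] at hok
      exact ⟨hok.1.1, hok.1.2, hok.2.1, hok.2.2⟩
    obtain ⟨K, V⟩ := pv_markFold (PySem.List.pyRange s e 1) day q d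
      (by
        intro i hi
        have hse := hse' (List.ne_nil_of_mem hi)
        rw [PySem.List.mem_pyRange_one] at hi
        have := hbnds hse
        omega)
      (fun hne => ⟨(hbnds (hse' hne)).2.2.1, (hbnds (hse' hne)).2.2.2⟩)
      hkeys hval
    refine ⟨K, fun h h0 h24 => ?_⟩
    rw [V h h0 h24]
    apply List.map_congr_left
    intro c _
    simp only [pvCovers, hg0, hp0, hg1, hg2, hp1, hp2, if_pos hlt,
      PySem.List.mem_pyRange_one]
    exact congrArg (fun b => q h c || b) (pv_cell_same (s ≤ h) (h < e) c _)
  · -- wraparound branch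
    rw [if_neg hlt] at hok ⊢
    rw [Bool.and_eq_true] at hok
    obtain ⟨hok1, hok2⟩ := hok
    have hs' : PySem.List.pyRange s 24 1 ≠ [] → s < 24 := by
      intro hne
      by_contra hc
      exact hne (PySem.List.pyRange_one_eq_nil (by omega))
    have hbnds1 : s < 24 → 0 ≤ s ∧ -7 ≤ day ∧ day < 7 := by
      intro hs
      simp only [hs, decide_true, Bool.not_true, Bool.false_or, Bool.and_eq_true,
        decide_eq_true_eq] at hok1
      exact ⟨hok1.1, hok1.2.1, hok1.2.2⟩
    have he' : PySem.List.pyRange 0 e 1 ≠ [] → 0 < e := by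
      intro hne
      by_contra hc
      exact hne (PySem.List.pyRange_one_eq_nil (by omega))
    have hbnds2 : 0 < e → e ≤ 24 := by
      intro hepos
      simp only [hepos, decide_true, Bool.not_true, Bool.false_or, decide_eq_true_eq] at hok2
      exact hok2
    obtain ⟨K1, V1⟩ := pv_markFold (PySem.List.pyRange s 24 1) day q d
      (by
        intro i hi
        have hs := hs' (List.ne_nil_of_mem hi)
        rw [PySem.List.mem_pyRange_one] at hi
        have := hbnds1 hs
        omega)
      (fun hne => ⟨(hbnds1 (hs' hne)).2.1, (hbnds1 (hs' hne)).2.2⟩)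
      hkeys hval
    obtain ⟨K2, V2⟩ := pv_markFold (PySem.List.pyRange 0 e 1) (PySem.Int.mod (day + 1) 7)
      (fun h c => q h c || (decide (h ∈ PySem.List.pyRange s 24 1) && decide (c = PySem.Int.mod day 7)))
      _
      (by
        intro i hi
        have hepos := he' (List.ne_nil_of_mem hi)
        rw [PySem.List.mem_pyRange_one] at hi
        have := hbnds2 hepos
        omega)
      (fun _ => ⟨le_trans (by norm_num) (PySem.Int.mod_nonneg _ (by norm_num)),
        PySem.Int.mod_lt _ (by norm_num)⟩)
      K1 V1
    refine ⟨K2, fun h h0 h24 => ?_⟩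
    rw [V2 h h0 h24]
    apply List.map_congr_left
    intro c _
    rw [pv_mod_idem]
    simp only [pvCovers, hg0, hp0, hg1, hg2, hp1, hp2, if_neg hlt,
      PySem.List.mem_pyRange_one]
    exact pv_cell_wrap (q h c) s e h c _ _ h0 h24

-- A's whole fold, tracked pointwise: it ORs in B's any-over-shifts test
theorem pv_loop (netid : String) (l : List (String × List String))
    (hok : ∀ p ∈ l, netid ∈ p.2 → pvKeyOK p.1 = true)
    (q : Int → Int → Bool) (d : PySem.Dict String (List Bool))
    (hkeys : d.keys = pvStdK)
    (hval : ∀ h : Int, 0 ≤ h → h < 24 →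
      d.getD (PySem.Int.toStr h) [] = (PySem.List.pyRange 0 7 1).map (q h)) :
    (l.foldl (pvAStep netid) d).keys = pvStdK
    ∧ ∀ h : Int, 0 ≤ h → h < 24 →
      (l.foldl (pvAStep netid) d).getD (PySem.Int.toStr h) []
      = (PySem.List.pyRange 0 7 1).map
          (fun c => q h c ||
            ((l.filter (fun kv => netid ∈ kv.2)).map (fun kv => (PySem.Str.split? kv.1 "_").getD [])).any
              (fun items => pvCovers items h c)) := by
  induction l generalizing q d with
  | nil =>
    refine ⟨hkeys, fun h h0 h24 => ?_⟩
    simp only [List.foldl_nil, List.filter_nil, List.map_nil, List.any_nil]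
    rw [hval h h0 h24]
    simp
  | cons p t ih =>
    simp only [List.foldl_cons]
    by_cases hm : netid ∈ p.2
    · obtain ⟨K1, V1⟩ := pv_keyStep netid p hm (hok p List.mem_cons_self hm) q d hkeys hval
      obtain ⟨K, V⟩ := ih (fun p' hp' => hok p' (List.mem_cons_of_mem p hp')) _ _ K1 V1
      refine ⟨K, fun h h0 h24 => ?_⟩
      rw [V h h0 h24]
      apply List.map_congr_left
      intro c _
      simp [hm, Bool.or_assoc]
    · have hstep : pvAStep netid d p = d := by unfold pvAStep; rw [if_neg hm]
      rw [hstep]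
      obtain ⟨K, V⟩ := ih (fun p' hp' => hok p' (List.mem_cons_of_mem p hp')) q d hkeys hval
      refine ⟨K, fun h h0 h24 => ?_⟩
      rw [V h h0 h24]
      apply List.map_congr_left
      intro c _
      simp [hm]

-- A's initial grid
def pvInit : PySem.Dict String (List Bool) :=
  (PySem.List.pyRange 0 24 1).foldl
    (fun d i => d.insert (PySem.Int.toStr i) (List.replicate 7 false)) (PySem.Dict.mk [])

theorem pv_init_keys : pvInit.keys = pvStdK := by decide

theorem pv_init_val : ∀ h : Int, 0 ≤ h → h < 24 →
    pvInit.getD (PySem.Int.toStr h) [] = (PySem.List.pyRange 0 7 1).map (fun _ => false) := by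
  intro h h0 h24
  interval_cases h <;> decide

-- ===== VERDICT (by name: the statement is the Claim_ definition above) =====
theorem parse_user_schedule_spec : Claim_equal_parse_user_schedule := by
  intro netid gs _hdom hpre
  show parse_user_schedule netid gs = parse_user_schedule_alt netid gs
  obtain ⟨_hnodup, hok⟩ := hpre
  have hA : parse_user_schedule netid gs = (gs.foldl (pvAStep netid) pvInit).items := rfl
  have hB : parse_user_schedule_alt netid gs
      = (PySem.List.pyRange 0 24 1).map (fun h =>
          (PySem.Int.toStr h,
           (PySem.List.pyRange 0 7 1).map (fun d =>
             ((gs.filter (fun kv => netid ∈ kv.2)).map (fun kv => (PySem.Str.split? kv.1 "_").getD [])).any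
               (fun items => pvCovers items h d)))) := rfl
  rw [hA, hB]
  obtain ⟨K, V⟩ := pv_loop netid gs hok (fun _ _ => false) pvInit pv_init_keys pv_init_val
  rw [PySem.Dict.items_eq_map_keys _ (by rw [K]; decide) [], K]
  unfold pvStdK
  rw [List.map_map]
  apply List.map_congr_left
  intro h hh
  rw [PySem.List.mem_pyRange_one] at hh
  refine congrArg (Prod.mk _) ?_
  rw [V h hh.1 hh.2]
  apply List.map_congr_left
  intro c _
  simp
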